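-- pv_equiv track=rewrite | github.com/Michieldoesburg/economics_of_cybersecurity | Assignment-Block-4/code/top_20_percent_succesful_vendors_.py | get_vendors_in_year
-- ===== SOURCE A (Python) =====
-- def get_vendors_in_year(item_sales, vendors_per_item):
-- 	vendors = []
-- 	count = 0
-- 	for item in item_sales:
-- 		if item in vendors_per_item:
-- 			for vendor in vendors_per_item[item]:
-- 				if vendor not in vendors:
-- 					vendors.append(vendor)
-- 	return vendors
-- ===== SOURCE B (Python) =====
-- def _nub(xs):
--     # filter-based dedup: emit the head, then rebuild the list with every
--     # copy of it removed (no membership test against the output)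
--     out = []
--     while xs:
--         head = xs[0]
--         out.append(head)
--         xs = list(filter(head.__ne__, xs))
--     return out
--
-- def get_vendors_in_year(item_sales, vendors_per_item):
--     flat = [v for item in item_sales if item in vendors_per_item
--               for v in vendors_per_item[item]]
--     return _nub(flat)
-- ===== Notes on version B (the rewrite author's own statement) =====
-- stated objective: alternative
-- what changed: A grows a result list and tests each candidate vendor against it; B first flattens the vendor lists of sold items, then deduplicates with the filter-based nub loop: it emits the current head and rebuilds the remainder with all later copies of that head removed, so no membership test against the output ever happens.
import Mathlib
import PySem

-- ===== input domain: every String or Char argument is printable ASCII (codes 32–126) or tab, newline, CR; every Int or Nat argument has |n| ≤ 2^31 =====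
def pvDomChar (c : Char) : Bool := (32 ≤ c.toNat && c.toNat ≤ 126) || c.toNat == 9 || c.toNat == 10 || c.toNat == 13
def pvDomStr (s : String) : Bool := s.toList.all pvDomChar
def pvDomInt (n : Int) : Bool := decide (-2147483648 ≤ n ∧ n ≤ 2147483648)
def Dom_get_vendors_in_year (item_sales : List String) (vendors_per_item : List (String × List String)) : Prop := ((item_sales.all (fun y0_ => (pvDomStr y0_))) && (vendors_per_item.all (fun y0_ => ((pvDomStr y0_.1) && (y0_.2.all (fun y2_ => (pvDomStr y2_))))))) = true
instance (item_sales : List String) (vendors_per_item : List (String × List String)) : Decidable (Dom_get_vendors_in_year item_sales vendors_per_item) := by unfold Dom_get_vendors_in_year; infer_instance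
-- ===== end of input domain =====

-- B flattens the vendor lists of sold items and then deduplicates with a
-- filter-based nub loop (drop later copies of each emitted head), instead of
-- A's per-vendor membership test against the growing result (alternative).

-- ===== PORT A =====
def get_vendors_in_year (item_sales : List String) (vendors_per_item : List (String × List String)) : List String :=
  item_sales.foldl (fun vendors item =>
    if PySem.Dict.contains (PySem.Dict.mk vendors_per_item) item then
      (PySem.Dict.getD (PySem.Dict.mk vendors_per_item) item []).foldl (fun vs vendor =>
        if vs.contains vendor then vs else vs ++ [vendor]) vendors
    else vendors) []

-- ===== PORT B =====
-- the while loop of _nub: emit xs[0], rebuild xs with every copy of it removed, repeat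
def pvNubLoop (out : List String) (xs : List String) : List String :=
  match xs with
  | [] => out
  | head :: tail => pvNubLoop (out ++ [head]) ((head :: tail).filter (fun y => y != head))
termination_by xs.length
decreasing_by
  simp
  exact List.length_filter_le _ _

def get_vendors_in_year_alt (item_sales : List String) (vendors_per_item : List (String × List String)) : List String :=
  pvNubLoop []
    (item_sales.flatMap (fun item =>
      if PySem.Dict.contains (PySem.Dict.mk vendors_per_item) item then
        PySem.Dict.getD (PySem.Dict.mk vendors_per_item) item []
      else []))

-- ===== PRECONDITION & SPEC =====
def Spec_get_vendors_in_year (item_sales : List String) (vendors_per_item : List (String × List String)) (out : List String) : Prop := out = get_vendors_in_year_alt item_sales vendors_per_item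
instance (item_sales : List String) (vendors_per_item : List (String × List String)) (out : List String) : Decidable (Spec_get_vendors_in_year item_sales vendors_per_item out) := by unfold Spec_get_vendors_in_year; infer_instance

-- ===== CLAIM (what is proved, stated in full; the proofs are below) =====
def Claim_equal_get_vendors_in_year : Prop := ∀ (item_sales : List String) (vendors_per_item : List (String × List String)), Dom_get_vendors_in_year item_sales vendors_per_item → Spec_get_vendors_in_year item_sales vendors_per_item (get_vendors_in_year item_sales vendors_per_item)

-- ===== LEMMAS AND PROOFS =====

-- recursive (non-accumulator) nub, the proof intermediate
def pvNub : List String → List String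
  | [] => []
  | head :: tail => head :: pvNub (tail.filter (fun y => y != head))
termination_by xs => xs.length
decreasing_by
  simpa using Nat.lt_succ_of_le (List.length_filter_le _ _)

theorem pvNubLoop_eq (out xs : List String) : pvNubLoop out xs = out ++ pvNub xs := by
  match xs with
  | [] => simp [pvNubLoop, pvNub]
  | head :: tail =>
    have h : (head :: tail).filter (fun y => y != head) = tail.filter (fun y => y != head) := by
      simp
    calc pvNubLoop out (head :: tail)
        = pvNubLoop (out ++ [head]) (tail.filter (fun y => y != head)) := by
          rw [pvNubLoop.eq_def]; simp only [h]
      _ = (out ++ [head]) ++ pvNub (tail.filter (fun y => y != head)) := pvNubLoop_eq _ _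
      _ = out ++ pvNub (head :: tail) := by rw [pvNub]; simp
termination_by xs.length
decreasing_by
  simpa using Nat.lt_succ_of_le (List.length_filter_le _ _)

-- A's insert-if-absent fold equals: keep acc, then nub of the elements not in acc
theorem pvIns_fold_eq (xs acc : List String) :
    xs.foldl (fun vs v => if vs.contains v then vs else vs ++ [v]) acc
      = acc ++ pvNub (xs.filter (fun v => !acc.contains v)) := by
  induction xs generalizing acc with
  | nil => simp [pvNub]
  | cons x t ih =>
    simp only [List.foldl_cons]
    by_cases h : acc.contains x
    · have hx : x ∈ acc := by simpa using h
      rw [if_pos h, ih, List.filter_cons]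
      simp [hx]
    · have hx : x ∉ acc := by simpa using h
      rw [if_neg h, ih, List.filter_cons]
      simp only [h, Bool.not_false, if_pos]
      rw [pvNub]
      simp only [List.append_assoc, List.singleton_append]
      congr 2
      rw [List.filter_filter]
      apply congrArg
      apply List.filter_congr
      intro a _
      simp
      by_cases h1 : a = x <;> by_cases h2 : a ∈ acc <;> simp [h1, h2]

-- A's nested loop equals the insert fold over the flattened vendor list
theorem pvA_flat (c : String → Bool) (g : String → List String) (l acc : List String) :
    l.foldl (fun vendors item =>
        if c item then (g item).foldl (fun vs v => if vs.contains v then vs else vs ++ [v]) vendors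
        else vendors) acc
      = (l.flatMap (fun item => if c item then g item else [])).foldl
          (fun vs v => if vs.contains v then vs else vs ++ [v]) acc := by
  induction l generalizing acc with
  | nil => simp
  | cons i l ih =>
    simp only [List.foldl_cons, List.flatMap_cons, List.foldl_append]
    by_cases h : c i = true
    · rw [if_pos h, if_pos h]; exact ih _
    · rw [if_neg h, if_neg h]; simpa using ih acc

-- ===== VERDICT (by name: the statement is the Claim_ definition above) =====
theorem get_vendors_in_year_spec : Claim_equal_get_vendors_in_year := by
  intro item_sales vendors_per_item _
  unfold Spec_get_vendors_in_year get_vendors_in_year get_vendors_in_year_alt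
  rw [pvA_flat, pvIns_fold_eq, pvNubLoop_eq]
  simp
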